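-- pv_equiv track=rewrite | github.com/CBAST-and/sir_project | parallel/sir_parallel.py | _make_slices
-- ===== SOURCE A (Python) =====
-- def _make_slices(H: int, n: int) -> list:
--     """
--     Devuelve lista de (start_row, end_row) para n franjas horizontales.
--     Las filas sobrantes (H % n) se reparten una a una en las primeras franjas.
--     """
--     base, rem = divmod(H, n)
--     slices, s = [], 0
--     for k in range(n):
--         e = s + base + (1 if k < rem else 0)
--         slices.append((s, e))
--         s = e
--     return slices
-- ===== SOURCE B (Python) =====
-- def _make_slices(H: int, n: int) -> list:
--     """Closed-form slice bounds: slice k is an independent function of k."""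
--     base, rem = divmod(H, n)
--     return [(k * base + min(k, rem), (k + 1) * base + min(k + 1, rem))
--             for k in range(n)]
-- ===== Notes on version B (the rewrite author's own statement) =====
-- stated objective: alternative
-- what changed: Replaces the running-accumulator loop (each end depends on the previous end) by a comprehension computing each slice's bounds as a closed-form function of its index k via k*base + min(k, rem).
import Mathlib
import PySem

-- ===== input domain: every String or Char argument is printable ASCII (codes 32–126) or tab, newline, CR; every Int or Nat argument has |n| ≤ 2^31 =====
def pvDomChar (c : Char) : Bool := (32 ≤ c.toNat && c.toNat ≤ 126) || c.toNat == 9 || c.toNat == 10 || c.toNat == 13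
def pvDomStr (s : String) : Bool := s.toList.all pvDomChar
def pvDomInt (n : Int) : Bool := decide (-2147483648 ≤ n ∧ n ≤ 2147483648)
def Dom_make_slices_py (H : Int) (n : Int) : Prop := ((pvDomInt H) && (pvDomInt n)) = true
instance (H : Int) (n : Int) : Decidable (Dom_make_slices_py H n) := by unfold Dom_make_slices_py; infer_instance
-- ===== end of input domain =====

-- B computes each slice's bounds as a closed-form function of its index k instead of
-- threading a running accumulator (objective: alternative decomposition, same cost).

-- ===== PORT A =====
def make_slices_py (H : Int) (n : Int) : List (Int × Int) :=
  match PySem.Int.divmod? H n with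
  | none => []   -- n = 0: Python raises ZeroDivisionError; excluded by Pre_
  | some (base, rem) =>
    ((PySem.List.pyRange 0 n 1).foldl
      (fun (p : List (Int × Int) × Int) k =>
        let e := p.2 + base + (if k < rem then 1 else 0)
        (p.1 ++ [(p.2, e)], e)) ([], 0)).1

-- ===== PORT B =====
def make_slices_py_alt (H : Int) (n : Int) : List (Int × Int) :=
  match PySem.Int.divmod? H n with
  | none => []   -- n = 0: Python raises ZeroDivisionError; excluded by Pre_
  | some (base, rem) =>
    (PySem.List.pyRange 0 n 1).map
      (fun k => (k * base + min k rem, (k + 1) * base + min (k + 1) rem))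

-- ===== PRECONDITION & SPEC =====
-- A raises ZeroDivisionError exactly when n = 0.
def Pre_make_slices_py (H : Int) (n : Int) : Prop := n ≠ 0
instance (H : Int) (n : Int) : Decidable (Pre_make_slices_py H n) := by unfold Pre_make_slices_py; infer_instance
def pvWitness_make_slices_py : Int × Int := (7, 3)

def Spec_make_slices_py (H : Int) (n : Int) (out : List (Int × Int)) : Prop := out = make_slices_py_alt H n
instance (H : Int) (n : Int) (out : List (Int × Int)) : Decidable (Spec_make_slices_py H n out) := by unfold Spec_make_slices_py; infer_instance

-- ===== CLAIM (what is proved, stated in full; the proofs are below) =====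
def Claim_equal_make_slices_py : Prop := ∀ (H : Int) (n : Int), Dom_make_slices_py H n → Pre_make_slices_py H n → Spec_make_slices_py H n (make_slices_py H n)

-- ===== LEMMAS AND PROOFS =====

-- Loop invariant: starting the accumulator at s = a*base + min a rem, A's fold over
-- range(a, n) appends exactly B's closed-form tuples for each k in that range.
theorem make_slices_loop (base rem : Int) (m : Nat) : ∀ (a n : Int) (acc : List (Int × Int)),
    0 ≤ a → (n - a).toNat = m →
    ((PySem.List.pyRange a n 1).foldl
      (fun (p : List (Int × Int) × Int) k =>
        let e := p.2 + base + (if k < rem then 1 else 0)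
        (p.1 ++ [(p.2, e)], e)) (acc, a * base + min a rem)).1
    = acc ++ (PySem.List.pyRange a n 1).map
        (fun k => (k * base + min k rem, (k + 1) * base + min (k + 1) rem)) := by
  induction m with
  | zero =>
    intro a n acc ha hm
    rw [PySem.List.pyRange_one_eq_nil (by omega)]
    simp
  | succ m ih =>
    intro a n acc ha hm
    rw [PySem.List.pyRange_one_cons (by omega)]
    simp only [List.foldl_cons, List.map_cons]
    have he : a * base + min a rem + base + (if a < rem then 1 else 0)
        = (a + 1) * base + min (a + 1) rem := by
      have h1 : (a + 1) * base = a * base + base := by ring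
      rcases lt_or_ge a rem with h | h
      · rw [if_pos h, min_eq_left (by omega), min_eq_left (by omega), h1]; ring
      · rw [if_neg (not_lt.mpr h), min_eq_right h, min_eq_right (by omega), h1]; ring
    rw [he]
    rw [ih (a + 1) n (acc ++ [(a * base + min a rem, (a + 1) * base + min (a + 1) rem)])
        (by omega) (by omega)]
    simp

-- ===== VERDICT (by name: the statement is the Claim_ definition above) =====
theorem make_slices_py_spec : Claim_equal_make_slices_py := by
  intro H n _ _
  unfold Spec_make_slices_py make_slices_py make_slices_py_alt
  cases h : PySem.Int.divmod? H n with
  | none => rfl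
  | some br =>
    obtain ⟨base, rem⟩ := br
    simp only
    have := make_slices_loop base rem (n - 0).toNat 0 n [] (le_refl 0) rfl
    simp only [Int.zero_mul, Int.zero_add, List.nil_append] at this
    -- the start value 0 equals 0*base + min 0 rem since rem = H fmod n ≥ 0 when n > 0;
    -- when n < 0 the range is empty on both sides
    rcases lt_or_ge 0 n with hn | hn
    swap
    · rw [PySem.List.pyRange_one_eq_nil (by omega)]; simp
    · have hrem : 0 ≤ rem := by
        simp only [PySem.Int.divmod?] at h
        split at h
        · exact absurd h (by simp)
        · injection h with h'
          have h2 : H.fmod n = rem := congrArg Prod.snd h'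
          rw [← h2]; exact Int.fmod_nonneg_of_pos H hn
      rw [min_eq_left hrem] at this
      simpa using this
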